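-- pv_equiv track=rewrite | github.com/JoaquinCarbonaro/Starks-ejercicios-programacion1-consola | stark_2/funciones.py | encontrar_maximo_minimo
-- ===== SOURCE A (Python) =====
-- def encontrar_maximo_minimo(lista: list, tipo: str, max_min: str) -> list: #tipo=altura/fuerza
--     '''
--     Encuentra el valor maximo o minimo (según el tipo) y devuelve una lista con uno o varios
--     resultados en caso de existir varios con el mismo valor.
--     Parámetros: lista (list), tipo (str), max_min (str)
--     Devuelve: Una lista de diccionarios.
--     '''
--     dic_min_max = lista[0]
--     resultado = []
--
--     for personaje in lista:
--         if max_min == "maximo" and (personaje[tipo] > dic_min_max[tipo]):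
--             dic_min_max = personaje
--             resultado = [dic_min_max]
--         elif max_min == "minimo" and (personaje[tipo] < dic_min_max[tipo]):
--             dic_min_max = personaje
--             resultado = [dic_min_max]
--         elif personaje[tipo] == dic_min_max[tipo]:
--             resultado.append(personaje)
--
--     return resultado
-- ===== SOURCE B (Python) =====
-- def encontrar_maximo_minimo(lista: list, tipo: str, max_min: str) -> list:
--     base = lista[0]
--     if max_min == "maximo":
--         extremo = max(p[tipo] for p in lista)
--     elif max_min == "minimo":
--         extremo = min(p[tipo] for p in lista)
--     else:
--         extremo = base[tipo]
--     return [p for p in lista if p[tipo] == extremo]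
-- ===== Notes on version B (the rewrite author's own statement) =====
-- stated objective: simpler
-- what changed: Replaces the single-pass running-best-with-tie-list loop by a two-phase decomposition: compute the extreme value (max/min, or the first element's value for any other max_min) and then filter the list for elements equal to it.
import Mathlib
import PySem

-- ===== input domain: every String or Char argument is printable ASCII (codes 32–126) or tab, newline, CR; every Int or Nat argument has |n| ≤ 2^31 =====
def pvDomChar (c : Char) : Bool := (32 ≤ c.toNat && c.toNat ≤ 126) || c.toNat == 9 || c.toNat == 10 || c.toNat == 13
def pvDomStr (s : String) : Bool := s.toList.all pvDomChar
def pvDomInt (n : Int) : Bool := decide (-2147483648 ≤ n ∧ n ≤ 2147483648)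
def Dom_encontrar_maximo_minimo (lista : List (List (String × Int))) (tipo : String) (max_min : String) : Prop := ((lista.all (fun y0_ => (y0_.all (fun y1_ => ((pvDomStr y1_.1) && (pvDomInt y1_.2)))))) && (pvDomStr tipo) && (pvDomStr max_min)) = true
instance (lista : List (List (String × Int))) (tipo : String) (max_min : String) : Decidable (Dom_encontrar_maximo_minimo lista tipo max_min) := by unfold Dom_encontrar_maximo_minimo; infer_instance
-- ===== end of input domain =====

-- B replaces A's single-pass running-best-with-tie-list loop by a simpler two-phase
-- decomposition: compute the extreme value, then filter the list for ties (objective: simpler).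

-- first-match lookup personaje[tipo]; Pre_ guarantees the key is present (Python raises KeyError
-- otherwise, so the default 0 is never reached on admitted inputs)
def pvLook (p : List (String × Int)) (tipo : String) : Int :=
  (((p.find? (fun q => q.1 == tipo)).map (fun q => q.2)).getD 0)

-- ===== PORT A =====
-- the loop body of A (branches in A's order)
def pvStepA (tipo max_min : String)
    (st : (List (String × Int)) × List (List (String × Int))) (personaje : List (String × Int)) :
    (List (String × Int)) × List (List (String × Int)) :=
  if max_min = "maximo" ∧ pvLook personaje tipo > pvLook st.1 tipo then (personaje, [personaje])
  else if max_min = "minimo" ∧ pvLook personaje tipo < pvLook st.1 tipo then (personaje, [personaje])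
  else if pvLook personaje tipo = pvLook st.1 tipo then (st.1, st.2 ++ [personaje])
  else st

def encontrar_maximo_minimo (lista : List (List (String × Int))) (tipo : String) (max_min : String) : List (List (String × Int)) :=
  match lista with
  | [] => []  -- Python: lista[0] raises IndexError; excluded by Pre_
  | h :: _ => (lista.foldl (pvStepA tipo max_min) (h, [])).2

-- ===== PORT B =====
def encontrar_maximo_minimo_alt (lista : List (List (String × Int))) (tipo : String) (max_min : String) : List (List (String × Int)) :=
  match lista with
  | [] => []  -- Python: lista[0] raises IndexError; excluded by Pre_
  | base :: _ =>
    let vals := lista.map (fun p => pvLook p tipo)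
    let extremo : Int :=
      if max_min = "maximo" then (PySem.List.max? vals (fun v => v)).getD 0   -- vals ≠ [], getD unused
      else if max_min = "minimo" then (PySem.List.min? vals (fun v => v)).getD 0
      else pvLook base tipo
    lista.filter (fun p => pvLook p tipo == extremo)

-- ===== PRECONDITION & SPEC =====
-- Pre_ excludes exactly the inputs where Python A raises: the empty list (IndexError on lista[0])
-- and lists containing an element without key tipo (KeyError).
def Pre_encontrar_maximo_minimo (lista : List (List (String × Int))) (tipo : String) (max_min : String) : Prop :=
  lista ≠ [] ∧ ∀ p ∈ lista, (p.find? (fun q => q.1 == tipo)).isSome = true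
instance (lista : List (List (String × Int))) (tipo : String) (max_min : String) : Decidable (Pre_encontrar_maximo_minimo lista tipo max_min) := by unfold Pre_encontrar_maximo_minimo; infer_instance

def pvWitness_encontrar_maximo_minimo : (List (List (String × Int))) × String × String :=
  ([[("altura", 3)], [("altura", 5)], [("altura", 5)]], "altura", "maximo")

def Spec_encontrar_maximo_minimo (lista : List (List (String × Int))) (tipo : String) (max_min : String) (out : List (List (String × Int))) : Prop := out = encontrar_maximo_minimo_alt lista tipo max_min
instance (lista : List (List (String × Int))) (tipo : String) (max_min : String) (out : List (List (String × Int))) : Decidable (Spec_encontrar_maximo_minimo lista tipo max_min out) := by unfold Spec_encontrar_maximo_minimo; infer_instance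

-- ===== CLAIM (what is proved, stated in full; the proofs are below) =====
def Claim_equal_encontrar_maximo_minimo : Prop := ∀ (lista : List (List (String × Int))) (tipo : String) (max_min : String), Dom_encontrar_maximo_minimo lista tipo max_min → Pre_encontrar_maximo_minimo lista tipo max_min → Spec_encontrar_maximo_minimo lista tipo max_min (encontrar_maximo_minimo lista tipo max_min)

-- ===== LEMMAS AND PROOFS =====

-- running max / min of the looked-up values, as A's loop maintains it
def pvM (tipo : String) (xs : List (List (String × Int))) (b : Int) : Int :=
  xs.foldl (fun a p => max a (pvLook p tipo)) b
def pvMn (tipo : String) (xs : List (List (String × Int))) (b : Int) : Int :=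
  xs.foldl (fun a p => min a (pvLook p tipo)) b

lemma pvM_ge (tipo : String) (xs : List (List (String × Int))) (b : Int) : b ≤ pvM tipo xs b := by
  induction xs generalizing b with
  | nil => simp [pvM]
  | cons x t ih =>
    simp only [pvM, List.foldl_cons] at *
    exact le_trans (le_max_left _ _) (ih _)

lemma pvM_mem (tipo : String) (xs : List (List (String × Int))) (b : Int)
    (p : List (String × Int)) (hp : p ∈ xs) : pvLook p tipo ≤ pvM tipo xs b := by
  induction xs generalizing b with
  | nil => cases hp
  | cons x t ih =>
    rcases List.mem_cons.mp hp with h | h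
    · subst h
      exact le_trans (le_max_right _ _) (pvM_ge tipo t _)
    · exact ih _ h

lemma pvM_of_all_le (tipo : String) (xs : List (List (String × Int))) (b : Int)
    (h : ∀ p ∈ xs, pvLook p tipo ≤ b) : pvM tipo xs b = b := by
  induction xs generalizing b with
  | nil => rfl
  | cons x t ih =>
    simp only [pvM, List.foldl_cons]
    rw [max_eq_left (h x (List.mem_cons_self))]
    exact ih _ (fun p hp => h p (List.mem_cons_of_mem _ hp))

lemma pvMn_le (tipo : String) (xs : List (List (String × Int))) (b : Int) : pvMn tipo xs b ≤ b := by
  induction xs generalizing b with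
  | nil => simp [pvMn]
  | cons x t ih =>
    simp only [pvMn, List.foldl_cons] at *
    exact le_trans (ih _) (min_le_left _ _)

lemma pvMn_mem (tipo : String) (xs : List (List (String × Int))) (b : Int)
    (p : List (String × Int)) (hp : p ∈ xs) : pvMn tipo xs b ≤ pvLook p tipo := by
  induction xs generalizing b with
  | nil => cases hp
  | cons x t ih =>
    rcases List.mem_cons.mp hp with h | h
    · subst h
      exact le_trans (pvMn_le tipo t _) (min_le_right _ _)
    · exact ih _ h

lemma pvMn_of_all_ge (tipo : String) (xs : List (List (String × Int))) (b : Int)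
    (h : ∀ p ∈ xs, b ≤ pvLook p tipo) : pvMn tipo xs b = b := by
  induction xs generalizing b with
  | nil => rfl
  | cons x t ih =>
    simp only [pvMn, List.foldl_cons]
    rw [min_eq_left (h x (List.mem_cons_self))]
    exact ih _ (fun p hp => h p (List.mem_cons_of_mem _ hp))

-- invariant of A's loop in the "maximo" case
lemma foldA_max (tipo : String) (xs : List (List (String × Int)))
    (d : List (String × Int)) (r : List (List (String × Int))) :
    pvLook (xs.foldl (pvStepA tipo "maximo") (d, r)).1 tipo = pvM tipo xs (pvLook d tipo) ∧
    (xs.foldl (pvStepA tipo "maximo") (d, r)).2 =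
      (if xs.any (fun p => pvLook p tipo > pvLook d tipo) then
         xs.filter (fun p => pvLook p tipo == pvM tipo xs (pvLook d tipo))
       else r ++ xs.filter (fun p => pvLook p tipo == pvLook d tipo)) := by
  induction xs generalizing d r with
  | nil => exact ⟨rfl, by simp⟩
  | cons x t ih =>
    simp only [List.foldl_cons, List.any_cons, List.filter_cons]
    rcases lt_trichotomy (pvLook x tipo) (pvLook d tipo) with hlt | heq | hgt
    · have hs : pvStepA tipo "maximo" (d, r) x = (d, r) := by
        unfold pvStepA
        rw [if_neg (fun h => absurd h.2 (by simp; omega)), if_neg (by simp),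
            if_neg (by simp; omega)]
      rw [hs]
      have hmx : max (pvLook d tipo) (pvLook x tipo) = pvLook d tipo := max_eq_left hlt.le
      have hM : pvM tipo (x :: t) (pvLook d tipo) = pvM tipo t (pvLook d tipo) := by
        simp only [pvM, List.foldl_cons, hmx]
      refine ⟨by rw [hM]; exact (ih d r).1, ?_⟩
      rw [(ih d r).2, hM, decide_eq_false (by omega : ¬ pvLook x tipo > pvLook d tipo),
          Bool.false_or]
      by_cases hany : t.any (fun p => pvLook p tipo > pvLook d tipo) = true
      · have hMgt : pvLook d tipo < pvM tipo t (pvLook d tipo) := by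
          obtain ⟨p, hp, hpp⟩ := List.any_eq_true.mp hany
          exact lt_of_lt_of_le (by simpa using hpp) (pvM_mem tipo t _ p hp)
        rw [if_pos hany, if_pos hany, if_neg (by simp; omega)]
      · rw [if_neg hany, if_neg hany, if_neg (by simp; omega)]
    · have hs : pvStepA tipo "maximo" (d, r) x = (d, r ++ [x]) := by
        unfold pvStepA
        rw [if_neg (fun h => absurd h.2 (by simp; omega)), if_neg (by simp), if_pos heq]
      rw [hs]
      have hmx : max (pvLook d tipo) (pvLook x tipo) = pvLook d tipo := max_eq_left heq.le
      have hM : pvM tipo (x :: t) (pvLook d tipo) = pvM tipo t (pvLook d tipo) := by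
        simp only [pvM, List.foldl_cons, hmx]
      refine ⟨by rw [hM]; exact (ih d (r ++ [x])).1, ?_⟩
      rw [(ih d (r ++ [x])).2, hM, decide_eq_false (by omega : ¬ pvLook x tipo > pvLook d tipo),
          Bool.false_or]
      by_cases hany : t.any (fun p => pvLook p tipo > pvLook d tipo) = true
      · have hMgt : pvLook d tipo < pvM tipo t (pvLook d tipo) := by
          obtain ⟨p, hp, hpp⟩ := List.any_eq_true.mp hany
          exact lt_of_lt_of_le (by simpa using hpp) (pvM_mem tipo t _ p hp)
        rw [if_pos hany, if_pos hany, if_neg (by simp; omega)]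
      · rw [if_neg hany, if_neg hany, if_pos (by simp [heq])]
        simp
    · have hs : pvStepA tipo "maximo" (d, r) x = (x, [x]) := by
        unfold pvStepA
        rw [if_pos ⟨rfl, hgt⟩]
      rw [hs]
      have hmx : max (pvLook d tipo) (pvLook x tipo) = pvLook x tipo := max_eq_right hgt.le
      have hM : pvM tipo (x :: t) (pvLook d tipo) = pvM tipo t (pvLook x tipo) := by
        simp only [pvM, List.foldl_cons, hmx]
      refine ⟨by rw [hM]; exact (ih x [x]).1, ?_⟩
      rw [(ih x [x]).2, hM, decide_eq_true (by omega : pvLook x tipo > pvLook d tipo),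
          Bool.true_or, if_pos rfl]
      by_cases hany : t.any (fun p => pvLook p tipo > pvLook x tipo) = true
      · have hMgt : pvLook x tipo < pvM tipo t (pvLook x tipo) := by
          obtain ⟨p, hp, hpp⟩ := List.any_eq_true.mp hany
          exact lt_of_lt_of_le (by simpa using hpp) (pvM_mem tipo t _ p hp)
        rw [if_pos hany, if_neg (by simp; omega)]
      · rw [if_neg hany]
        have hMeq : pvM tipo t (pvLook x tipo) = pvLook x tipo := by
          refine pvM_of_all_le tipo t _ (fun p hp => ?_)
          have := List.any_eq_false.mp (Bool.not_eq_true _ ▸ hany) p hp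
          simpa using this
        rw [hMeq, if_pos (by simp)]
        simp
-- invariant of A's loop in the "minimo" case (mirror of foldA_max)
lemma foldA_min (tipo : String) (xs : List (List (String × Int)))
    (d : List (String × Int)) (r : List (List (String × Int))) :
    pvLook (xs.foldl (pvStepA tipo "minimo") (d, r)).1 tipo = pvMn tipo xs (pvLook d tipo) ∧
    (xs.foldl (pvStepA tipo "minimo") (d, r)).2 =
      (if xs.any (fun p => pvLook p tipo < pvLook d tipo) then
         xs.filter (fun p => pvLook p tipo == pvMn tipo xs (pvLook d tipo))
       else r ++ xs.filter (fun p => pvLook p tipo == pvLook d tipo)) := by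
  induction xs generalizing d r with
  | nil => exact ⟨rfl, by simp⟩
  | cons x t ih =>
    simp only [List.foldl_cons, List.any_cons, List.filter_cons]
    rcases lt_trichotomy (pvLook x tipo) (pvLook d tipo) with hlt | heq | hgt
    · have hs : pvStepA tipo "minimo" (d, r) x = (x, [x]) := by
        unfold pvStepA
        rw [if_neg (by simp), if_pos ⟨rfl, hlt⟩]
      rw [hs]
      have hmx : min (pvLook d tipo) (pvLook x tipo) = pvLook x tipo := min_eq_right hlt.le
      have hM : pvMn tipo (x :: t) (pvLook d tipo) = pvMn tipo t (pvLook x tipo) := by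
        simp only [pvMn, List.foldl_cons, hmx]
      refine ⟨by rw [hM]; exact (ih x [x]).1, ?_⟩
      rw [(ih x [x]).2, hM, decide_eq_true (by omega : pvLook x tipo < pvLook d tipo),
          Bool.true_or, if_pos rfl]
      by_cases hany : t.any (fun p => pvLook p tipo < pvLook x tipo) = true
      · have hMlt : pvMn tipo t (pvLook x tipo) < pvLook x tipo := by
          obtain ⟨p, hp, hpp⟩ := List.any_eq_true.mp hany
          exact lt_of_le_of_lt (pvMn_mem tipo t _ p hp) (by simpa using hpp)
        rw [if_pos hany, if_neg (by simp; omega)]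
      · rw [if_neg hany]
        have hMeq : pvMn tipo t (pvLook x tipo) = pvLook x tipo := by
          refine pvMn_of_all_ge tipo t _ (fun p hp => ?_)
          have := List.any_eq_false.mp (Bool.not_eq_true _ ▸ hany) p hp
          simpa using this
        rw [hMeq, if_pos (by simp)]
        simp
    · have hs : pvStepA tipo "minimo" (d, r) x = (d, r ++ [x]) := by
        unfold pvStepA
        rw [if_neg (by simp), if_neg (fun h => absurd h.2 (by simp; omega)), if_pos heq]
      rw [hs]
      have hmx : min (pvLook d tipo) (pvLook x tipo) = pvLook d tipo := min_eq_left heq.ge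
      have hM : pvMn tipo (x :: t) (pvLook d tipo) = pvMn tipo t (pvLook d tipo) := by
        simp only [pvMn, List.foldl_cons, hmx]
      refine ⟨by rw [hM]; exact (ih d (r ++ [x])).1, ?_⟩
      rw [(ih d (r ++ [x])).2, hM, decide_eq_false (by omega : ¬ pvLook x tipo < pvLook d tipo),
          Bool.false_or]
      by_cases hany : t.any (fun p => pvLook p tipo < pvLook d tipo) = true
      · have hMlt : pvMn tipo t (pvLook d tipo) < pvLook d tipo := by
          obtain ⟨p, hp, hpp⟩ := List.any_eq_true.mp hany
          exact lt_of_le_of_lt (pvMn_mem tipo t _ p hp) (by simpa using hpp)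
        rw [if_pos hany, if_pos hany, if_neg (by simp; omega)]
      · rw [if_neg hany, if_neg hany, if_pos (by simp [heq])]
        simp
    · have hs : pvStepA tipo "minimo" (d, r) x = (d, r) := by
        unfold pvStepA
        rw [if_neg (by simp), if_neg (fun h => absurd h.2 (by simp; omega)),
            if_neg (by simp; omega)]
      rw [hs]
      have hmx : min (pvLook d tipo) (pvLook x tipo) = pvLook d tipo := min_eq_left hgt.le
      have hM : pvMn tipo (x :: t) (pvLook d tipo) = pvMn tipo t (pvLook d tipo) := by
        simp only [pvMn, List.foldl_cons, hmx]
      refine ⟨by rw [hM]; exact (ih d r).1, ?_⟩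
      rw [(ih d r).2, hM, decide_eq_false (by omega : ¬ pvLook x tipo < pvLook d tipo),
          Bool.false_or]
      by_cases hany : t.any (fun p => pvLook p tipo < pvLook d tipo) = true
      · have hMlt : pvMn tipo t (pvLook d tipo) < pvLook d tipo := by
          obtain ⟨p, hp, hpp⟩ := List.any_eq_true.mp hany
          exact lt_of_le_of_lt (pvMn_mem tipo t _ p hp) (by simpa using hpp)
        rw [if_pos hany, if_pos hany, if_neg (by simp; omega)]
      · rw [if_neg hany, if_neg hany, if_neg (by simp; omega)]

-- for any other max_min only the equality branch of A's loop ever fires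
lemma foldA_other (tipo max_min : String) (h1 : max_min ≠ "maximo") (h2 : max_min ≠ "minimo")
    (xs : List (List (String × Int))) (d : List (String × Int)) (r : List (List (String × Int))) :
    xs.foldl (pvStepA tipo max_min) (d, r) =
      (d, r ++ xs.filter (fun p => pvLook p tipo == pvLook d tipo)) := by
  induction xs generalizing r with
  | nil => simp
  | cons x t ih =>
    have hs : pvStepA tipo max_min (d, r) x =
        if pvLook x tipo = pvLook d tipo then (d, r ++ [x]) else (d, r) := by
      unfold pvStepA
      rw [if_neg (fun h => h1 h.1), if_neg (fun h => h2 h.1)]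
    simp only [List.foldl_cons, hs, List.filter_cons]
    by_cases hx : pvLook x tipo = pvLook d tipo
    · rw [if_pos hx, ih (r ++ [x]), if_pos (by simp [hx])]
      simp
    · rw [if_neg hx, ih r, if_neg (by simp [hx])]

-- ===== VERDICT (by name: the statement is the Claim_ definition above) =====
theorem encontrar_maximo_minimo_spec : Claim_equal_encontrar_maximo_minimo := by
  intro lista tipo max_min _hdom hpre
  obtain ⟨hne, -⟩ := hpre
  unfold Spec_encontrar_maximo_minimo
  match lista, hne with
  | h :: t, _ =>
    simp only [encontrar_maximo_minimo, encontrar_maximo_minimo_alt, List.map_cons]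
    by_cases hmax : max_min = "maximo"
    · subst hmax
      rw [if_pos rfl, PySem.List.max?_id_cons, Option.getD_some]
      have hfold : (t.map (fun p => pvLook p tipo)).foldl max (pvLook h tipo)
          = pvM tipo (h :: t) (pvLook h tipo) := by
        simp only [pvM, List.foldl_cons, max_self, List.foldl_map]
      rw [hfold]
      have H := (foldA_max tipo (h :: t) h []).2
      rw [H]
      by_cases hany : (h :: t).any (fun p => pvLook p tipo > pvLook h tipo) = true
      · rw [if_pos hany]
      · rw [if_neg hany]
        have hMeq : pvM tipo (h :: t) (pvLook h tipo) = pvLook h tipo := by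
          refine pvM_of_all_le tipo (h :: t) _ (fun p hp => ?_)
          have := List.any_eq_false.mp (Bool.not_eq_true _ ▸ hany) p hp
          simpa using this
        rw [hMeq, List.nil_append]
    · by_cases hmin : max_min = "minimo"
      · subst hmin
        rw [if_neg (by simp), if_pos rfl, PySem.List.min?_id_cons, Option.getD_some]
        have hfold : (t.map (fun p => pvLook p tipo)).foldl min (pvLook h tipo)
            = pvMn tipo (h :: t) (pvLook h tipo) := by
          simp only [pvMn, List.foldl_cons, min_self, List.foldl_map]
        rw [hfold]
        have H := (foldA_min tipo (h :: t) h []).2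
        rw [H]
        by_cases hany : (h :: t).any (fun p => pvLook p tipo < pvLook h tipo) = true
        · rw [if_pos hany]
        · rw [if_neg hany]
          have hMeq : pvMn tipo (h :: t) (pvLook h tipo) = pvLook h tipo := by
            refine pvMn_of_all_ge tipo (h :: t) _ (fun p hp => ?_)
            have := List.any_eq_false.mp (Bool.not_eq_true _ ▸ hany) p hp
            simpa using this
          rw [hMeq, List.nil_append]
      · rw [if_neg hmax, if_neg hmin, foldA_other tipo max_min hmax hmin (h :: t) h []]
        simp
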